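-- pv_equiv track=rewrite | github.com/ckeiituk/iplist-bot | services/dns.py | _pick_issue
-- ===== SOURCE A (Python) =====
-- from typing import Literal
--
-- DNSResolutionIssue = Literal[
--     "nxdomain",
--     "no_answer",
--     "no_nameservers",
--     "timeout",
--     "error",
-- ]
--
-- def _pick_issue(
--     issue4: DNSResolutionIssue | None,
--     issue6: DNSResolutionIssue | None,
-- ) -> DNSResolutionIssue | None:
--     issues = {issue4, issue6}
--     for candidate in ("nxdomain", "no_nameservers", "timeout", "no_answer", "error"):
--         if candidate in issues:
--             return candidate
--     return issue4 or issue6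
-- ===== SOURCE B (Python) =====
-- _RANK = {"nxdomain": 0, "no_nameservers": 1, "timeout": 2, "no_answer": 3, "error": 4}
--
--
-- def _pick_issue(issue4, issue6):
--     candidates = [i for i in (issue4, issue6) if i in _RANK]
--     if candidates:
--         return min(candidates, key=_RANK.__getitem__)
--     return issue4 or issue6
-- ===== Notes on version B (the rewrite author's own statement) =====
-- stated objective: idiomatic
-- what changed: Replaces the scan over the priority tuple with a rank dict: collect the inputs that are known issues and take the min by rank, keeping the literal `issue4 or issue6` fallback.
import Mathlib
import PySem

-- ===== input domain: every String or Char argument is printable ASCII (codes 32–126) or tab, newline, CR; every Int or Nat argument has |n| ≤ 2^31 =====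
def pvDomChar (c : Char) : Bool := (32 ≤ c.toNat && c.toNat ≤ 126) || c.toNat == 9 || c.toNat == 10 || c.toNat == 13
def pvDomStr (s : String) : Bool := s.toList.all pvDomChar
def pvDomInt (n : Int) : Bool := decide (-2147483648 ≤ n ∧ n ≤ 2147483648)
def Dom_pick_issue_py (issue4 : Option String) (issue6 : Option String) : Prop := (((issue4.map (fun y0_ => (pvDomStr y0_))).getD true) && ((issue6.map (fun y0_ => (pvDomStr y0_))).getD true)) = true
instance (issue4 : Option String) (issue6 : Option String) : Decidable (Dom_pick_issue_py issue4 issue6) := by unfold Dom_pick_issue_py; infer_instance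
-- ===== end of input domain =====

-- B replaces A's scan over the priority tuple by a rank-dict lookup and a min over the
-- (at most two) ranked inputs; same fallback `issue4 or issue6`. Objective: idiomatic.

-- ===== PORT A =====
-- Python truthiness fallback `issue4 or issue6` (this exact expression appears in both sources):
-- an Option String is truthy iff it is a nonempty string.
def pvPyOr (a b : Option String) : Option String :=
  match a with
  | some s => if s = "" then b else some s
  | none => b

-- A's for-loop over the candidate tuple: first candidate contained in `issues`, else none
def pvPickLoop (issues : PySem.Set (Option String)) : List String → Option String
  | [] => none
  | c :: rest => if PySem.Set.contains issues (some c) then some c else pvPickLoop issues rest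

def pick_issue_py (issue4 : Option String) (issue6 : Option String) : Option String :=
  let issues : PySem.Set (Option String) := PySem.Set.ofList [issue4, issue6]
  match pvPickLoop issues ["nxdomain", "no_nameservers", "timeout", "no_answer", "error"] with
  | some c => some c
  | none => pvPyOr issue4 issue6

-- ===== PORT B =====
def pvRank : PySem.Dict String Int :=
  PySem.Dict.ofList [("nxdomain", 0), ("no_nameservers", 1), ("timeout", 2), ("no_answer", 3), ("error", 4)]

def pick_issue_py_alt (issue4 : Option String) (issue6 : Option String) : Option String :=
  let candidates := ([issue4, issue6].filterMap id).filter (fun s => PySem.Dict.contains pvRank s)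
  match candidates with
  | [] => pvPyOr issue4 issue6
  | c :: rest =>
      -- min(candidates, key=_RANK.__getitem__): keep the first element whose key is minimal
      -- (every candidate is a key of pvRank, so getD _ 0 is exactly __getitem__ here)
      some (rest.foldl (fun best x =>
        if PySem.Dict.getD pvRank x 0 < PySem.Dict.getD pvRank best 0 then x else best) c)

-- ===== PRECONDITION & SPEC =====
def Spec_pick_issue_py (issue4 : Option String) (issue6 : Option String) (out : Option String) : Prop := out = pick_issue_py_alt issue4 issue6
instance (issue4 : Option String) (issue6 : Option String) (out : Option String) : Decidable (Spec_pick_issue_py issue4 issue6 out) := by unfold Spec_pick_issue_py; infer_instance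

-- ===== CLAIM (what is proved, stated in full; the proofs are below) =====
def Claim_equal_pick_issue_py : Prop := ∀ (issue4 : Option String) (issue6 : Option String), Dom_pick_issue_py issue4 issue6 → Spec_pick_issue_py issue4 issue6 (pick_issue_py issue4 issue6)

-- ===== LEMMAS AND PROOFS =====

-- A string that is none of the five issue literals: both its Set-membership tests in A's loop
-- and its rank-dict membership in B evaluate to false, packaged as the `==`-level facts simp needs.
theorem pv_not_issue_beq_false (s : String)
    (h1 : s ≠ "nxdomain") (h2 : s ≠ "no_nameservers") (h3 : s ≠ "timeout")
    (h4 : s ≠ "no_answer") (h5 : s ≠ "error") :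
    ("nxdomain" == s) = false ∧ ("no_nameservers" == s) = false ∧ ("timeout" == s) = false ∧
    ("no_answer" == s) = false ∧ ("error" == s) = false := by
  exact ⟨beq_eq_false_iff_ne.mpr (Ne.symm h1), beq_eq_false_iff_ne.mpr (Ne.symm h2),
    beq_eq_false_iff_ne.mpr (Ne.symm h3), beq_eq_false_iff_ne.mpr (Ne.symm h4),
    beq_eq_false_iff_ne.mpr (Ne.symm h5)⟩

-- ===== VERDICT (by name: the statement is the Claim_ definition above) =====
theorem pick_issue_py_spec : Claim_equal_pick_issue_py := by
  intro i4 i6 _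
  unfold Spec_pick_issue_py
  rcases i4 with _ | s4 <;> rcases i6 with _ | s6
  · rfl
  · by_cases h6 : s6 ∈ ["nxdomain", "no_nameservers", "timeout", "no_answer", "error"]
    · simp only [List.mem_cons, List.not_mem_nil, or_false] at h6
      rcases h6 with rfl | rfl | rfl | rfl | rfl <;> decide
    · simp only [List.mem_cons, List.not_mem_nil, or_false, not_or] at h6
      obtain ⟨h1, h2, h3, h4, h5⟩ := h6
      obtain ⟨b1, b2, b3, b4, b5⟩ := pv_not_issue_beq_false s6 h1 h2 h3 h4 h5
      simp [pick_issue_py, pick_issue_py_alt, pvPickLoop, pvRank, pvPyOr,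
        PySem.Set.ofList, PySem.Set.add, PySem.Set.contains, PySem.Dict.contains,
        PySem.Dict.get?, PySem.Dict.getD, PySem.Dict.ofList, PySem.Dict.update,
        PySem.Dict.insert, PySem.Dict.empty, List.filter, List.filterMap,
        h1, h2, h3, h4, h5, b1, b2, b3, b4, b5,
        Ne.symm h1, Ne.symm h2, Ne.symm h3, Ne.symm h4, Ne.symm h5]
  · by_cases h4' : s4 ∈ ["nxdomain", "no_nameservers", "timeout", "no_answer", "error"]
    · simp only [List.mem_cons, List.not_mem_nil, or_false] at h4'
      rcases h4' with rfl | rfl | rfl | rfl | rfl <;> decide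
    · simp only [List.mem_cons, List.not_mem_nil, or_false, not_or] at h4'
      obtain ⟨h1, h2, h3, h4, h5⟩ := h4'
      obtain ⟨b1, b2, b3, b4, b5⟩ := pv_not_issue_beq_false s4 h1 h2 h3 h4 h5
      simp [pick_issue_py, pick_issue_py_alt, pvPickLoop, pvRank, pvPyOr,
        PySem.Set.ofList, PySem.Set.add, PySem.Set.contains, PySem.Dict.contains,
        PySem.Dict.get?, PySem.Dict.getD, PySem.Dict.ofList, PySem.Dict.update,
        PySem.Dict.insert, PySem.Dict.empty, List.filter, List.filterMap,
        h1, h2, h3, h4, h5, b1, b2, b3, b4, b5,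
        Ne.symm h1, Ne.symm h2, Ne.symm h3, Ne.symm h4, Ne.symm h5]
  · by_cases h4' : s4 ∈ ["nxdomain", "no_nameservers", "timeout", "no_answer", "error"] <;>
    by_cases h6' : s6 ∈ ["nxdomain", "no_nameservers", "timeout", "no_answer", "error"] <;>
    simp only [List.mem_cons, List.not_mem_nil, or_false, not_or] at h4' h6'
    · rcases h4' with rfl | rfl | rfl | rfl | rfl <;> rcases h6' with rfl | rfl | rfl | rfl | rfl <;> decide
    · obtain ⟨g1, g2, g3, g4, g5⟩ := h6'
      obtain ⟨c1, c2, c3, c4, c5⟩ := pv_not_issue_beq_false s6 g1 g2 g3 g4 g5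
      rcases h4' with rfl | rfl | rfl | rfl | rfl <;>
        simp [pick_issue_py, pick_issue_py_alt, pvPickLoop, pvRank, pvPyOr,
          PySem.Set.ofList, PySem.Set.add, PySem.Set.contains, PySem.Dict.contains,
          PySem.Dict.get?, PySem.Dict.getD, PySem.Dict.ofList, PySem.Dict.update,
          PySem.Dict.insert, PySem.Dict.empty, List.filter, List.filterMap,
          g1, g2, g3, g4, g5, c1, c2, c3, c4, c5,
        Ne.symm g1, Ne.symm g2, Ne.symm g3, Ne.symm g4, Ne.symm g5]
    · obtain ⟨h1, h2, h3, h4, h5⟩ := h4'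
      obtain ⟨b1, b2, b3, b4, b5⟩ := pv_not_issue_beq_false s4 h1 h2 h3 h4 h5
      rcases h6' with rfl | rfl | rfl | rfl | rfl <;>
        simp [pick_issue_py, pick_issue_py_alt, pvPickLoop, pvRank, pvPyOr,
          PySem.Set.ofList, PySem.Set.add, PySem.Set.contains, PySem.Dict.contains,
          PySem.Dict.get?, PySem.Dict.getD, PySem.Dict.ofList, PySem.Dict.update,
          PySem.Dict.insert, PySem.Dict.empty, List.filter, List.filterMap,
          h1, h2, h3, h4, h5, b1, b2, b3, b4, b5,
        Ne.symm h1, Ne.symm h2, Ne.symm h3, Ne.symm h4, Ne.symm h5]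
    · obtain ⟨h1, h2, h3, h4, h5⟩ := h4'
      obtain ⟨g1, g2, g3, g4, g5⟩ := h6'
      obtain ⟨b1, b2, b3, b4, b5⟩ := pv_not_issue_beq_false s4 h1 h2 h3 h4 h5
      obtain ⟨c1, c2, c3, c4, c5⟩ := pv_not_issue_beq_false s6 g1 g2 g3 g4 g5
      rcases eq_or_ne s6 s4 with he | he <;>
      simp [pick_issue_py, pick_issue_py_alt, pvPickLoop, pvRank, pvPyOr,
        PySem.Set.ofList, PySem.Set.add, PySem.Set.contains, PySem.Dict.contains,
        PySem.Dict.get?, PySem.Dict.getD, PySem.Dict.ofList, PySem.Dict.update,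
        PySem.Dict.insert, PySem.Dict.empty, List.filter, List.filterMap,
        h1, h2, h3, h4, h5, g1, g2, g3, g4, g5, b1, b2, b3, b4, b5, c1, c2, c3, c4, c5,
        Ne.symm h1, Ne.symm h2, Ne.symm h3, Ne.symm h4, Ne.symm h5,
        Ne.symm g1, Ne.symm g2, Ne.symm g3, Ne.symm g4, Ne.symm g5, he]
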